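-- pv_equiv track=rewrite | github.com/josergdev/SkyscrapersNxN-Backtracking | skyscrapers4x4.py | get_clue_of_completed_row
-- ===== SOURCE A (Python) =====
-- def get_clue_of_completed_row(row):
--     v = 0
--     m = 0
--     for i, x in enumerate(row):
--         if m < x:
--             v += 1
--         m = max(m, x)
--     return v
-- ===== SOURCE B (Python) =====
-- def get_clue_of_completed_row(row):
--     # Build the 0-clamped prefix-maxima sequence, then count its distinct
--     # positive values: each new record height is visible exactly once.
--     prefix_max = []
--     m = 0
--     for x in row:
--         m = max(m, x)
--         prefix_max.append(m)
--     return len({p for p in prefix_max if p > 0})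
-- ===== Notes on version B (the rewrite author's own statement) =====
-- stated objective: alternative
-- what changed: Replaces A's fused compare-and-increment counting loop by a build-then-count decomposition: first materialise the 0-seeded prefix-maxima sequence, then return the number of distinct positive values in it via a set.
import Mathlib
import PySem

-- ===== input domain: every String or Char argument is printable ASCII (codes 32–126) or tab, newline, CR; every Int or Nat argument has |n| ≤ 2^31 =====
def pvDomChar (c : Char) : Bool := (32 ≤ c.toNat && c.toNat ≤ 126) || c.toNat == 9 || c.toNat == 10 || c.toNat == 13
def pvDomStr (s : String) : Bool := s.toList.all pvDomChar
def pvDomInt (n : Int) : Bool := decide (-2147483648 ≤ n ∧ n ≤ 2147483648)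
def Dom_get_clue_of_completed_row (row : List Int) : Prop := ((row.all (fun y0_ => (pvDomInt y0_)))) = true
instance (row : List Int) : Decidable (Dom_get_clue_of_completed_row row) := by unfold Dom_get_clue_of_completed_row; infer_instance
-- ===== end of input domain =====

-- ===== PORT A =====
-- Port of A: single pass keeping (visible count v, running max m).
def get_clue_of_completed_row (row : List Int) : Int :=
  (row.foldl (fun (s : Int × Int) x =>
      (if s.2 < x then s.1 + 1 else s.1, max s.2 x)) (0, 0)).1

-- ===== PORT B =====
-- Port of B: build the 0-seeded prefix-maxima list, then count its distinct
-- positive values as a set.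
def get_clue_of_completed_row_alt (row : List Int) : Int :=
  let pm := (row.foldl (fun (s : List Int × Int) x =>
      let m := max s.2 x
      (s.1 ++ [m], m)) (([] : List Int), 0)).1
  PySem.Set.len (PySem.Set.ofList (pm.filter (fun p => decide (0 < p))))

-- ===== PRECONDITION & SPEC =====
def Spec_get_clue_of_completed_row (row : List Int) (out : Int) : Prop := out = get_clue_of_completed_row_alt row
instance (row : List Int) (out : Int) : Decidable (Spec_get_clue_of_completed_row row out) := by unfold Spec_get_clue_of_completed_row; infer_instance

-- ===== CLAIM (what is proved, stated in full; the proofs are below) =====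
def Claim_equal_get_clue_of_completed_row : Prop := ∀ (row : List Int), Dom_get_clue_of_completed_row row → Spec_get_clue_of_completed_row row (get_clue_of_completed_row row)

-- ===== LEMMAS AND PROOFS =====

-- the initial seed is a lower bound of a max-fold
lemma init_le_foldl_max (l : List Int) (a : Int) : a ≤ l.foldl max a := by
  induction l generalizing a with
  | nil => simp
  | cons x xs ih => exact le_trans (le_max_left a x) (ih (max a x))

-- every member of the list is a lower bound of the max-fold
lemma mem_le_foldl_max (l : List Int) (a y : Int) (hy : y ∈ l) : y ≤ l.foldl max a := by
  induction l generalizing a with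
  | nil => cases hy
  | cons x xs ih =>
    rcases List.mem_cons.mp hy with h | h
    · subst h; exact le_trans (le_max_right a y) (init_le_foldl_max xs (max a y))
    · exact ih (max a x) h

-- set(l ++ [x]) is set(l) with x added
lemma ofList_append_singleton (l : List Int) (x : Int) :
    PySem.Set.ofList (l ++ [x]) = PySem.Set.add (PySem.Set.ofList l) x := by
  simp [PySem.Set.ofList_eq_foldl, List.foldl_append]

-- coupled loop invariant: A's counter tracks the distinct positive values of
-- the prefix-maxima list B has built so far
lemma key (xs : List Int) : ∀ (acc : List Int) (v m : Int),
    m = acc.foldl max 0 →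
    (acc = [] ∨ m ∈ acc) →
    v = PySem.Set.len (PySem.Set.ofList (acc.filter (fun p => decide (0 < p)))) →
    (xs.foldl (fun (s : Int × Int) x =>
        (if s.2 < x then s.1 + 1 else s.1, max s.2 x)) (v, m)).1
      = PySem.Set.len (PySem.Set.ofList
          (((xs.foldl (fun (s : List Int × Int) x =>
              let m := max s.2 x
              (s.1 ++ [m], m)) (acc, m)).1).filter (fun p => decide (0 < p)))) := by
  induction xs with
  | nil => intro acc v m _ _ hv; simpa using hv
  | cons x xs ih =>
    intro acc v m hm hmem hv
    simp only [List.foldl_cons]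
    by_cases hlt : m < x
    · simp only [if_pos hlt]
      apply ih (acc ++ [max m x]) (v + 1) (max m x)
      · simp [List.foldl_append, hm]
      · right; simp
      · have hm0 : 0 ≤ m := hm ▸ init_le_foldl_max acc 0
        have hx0 : 0 < x := lt_of_le_of_lt hm0 hlt
        have hmax : max m x = x := max_eq_right (le_of_lt hlt)
        have hxnot : x ∉ acc.filter (fun p => decide (0 < p)) := by
          intro hmemf
          have := mem_le_foldl_max acc 0 x (List.mem_of_mem_filter hmemf)
          omega
        rw [hmax, List.filter_append]
        simp only [List.filter_cons, List.filter_nil, hx0, decide_true, if_true]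
        rw [ofList_append_singleton, PySem.Set.add_of_not_mem (by
          intro h; exact hxnot ((PySem.Set.mem_ofList _ _).mp h))]
        simp [PySem.Set.len, hv]
    · simp only [if_neg hlt]
      apply ih (acc ++ [max m x]) v (max m x)
      · simp [List.foldl_append, hm]
      · right; simp
      · have hmax : max m x = m := max_eq_left (le_of_not_gt hlt)
        rw [hmax, List.filter_append]
        by_cases hm0 : 0 < m
        · rcases hmem with h | h
          · subst h; simp at hm; omega
          · have hmf : m ∈ acc.filter (fun p => decide (0 < p)) :=
              List.mem_filter.mpr ⟨h, by simpa using hm0⟩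
            simp only [List.filter_cons, List.filter_nil, hm0, decide_true, if_true]
            rw [ofList_append_singleton, PySem.Set.add_of_mem ((PySem.Set.mem_ofList _ _).mpr hmf)]
            exact hv
        · simp only [List.filter_cons, List.filter_nil, hm0, decide_false]
          simpa using hv

-- ===== VERDICT (by name: the statement is the Claim_ definition above) =====
theorem get_clue_of_completed_row_spec : Claim_equal_get_clue_of_completed_row := by
  intro row _
  unfold Spec_get_clue_of_completed_row get_clue_of_completed_row get_clue_of_completed_row_alt
  exact key row [] 0 0 rfl (Or.inl rfl) rfl
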